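-- pv_equiv track=rewrite | github.com/hamzaasif0433-art/voice_agentBE | voice/sip_client.py | _parse_sdp_rtp
-- ===== SOURCE A (Python) =====
-- def _parse_sdp_rtp(msg: str, fallback_ip: str):
--     rtp_ip, rtp_port = fallback_ip, 0
--     in_sdp = False
--     for line in msg.split("\r\n"):
--         if line == "":
--             in_sdp = True
--         if in_sdp:
--             if line.startswith("c=IN IP4 "):
--                 rtp_ip = line.split("c=IN IP4 ")[1].strip()
--             elif line.startswith("m=audio "):
--                 parts = line.split()
--                 if len(parts) >= 2:
--                     try:
--                         rtp_port = int(parts[1])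
--                     except ValueError:
--                         pass
--     return rtp_ip, rtp_port
-- ===== SOURCE B (Python) =====
-- def _parse_sdp_rtp(msg: str, fallback_ip: str):
--     lines = msg.split("\r\n")
--     if "" not in lines:
--         return fallback_ip, 0
--     body = lines[lines.index(""):]
--     rtp_ip = next((l.split("c=IN IP4 ")[1].strip()
--                    for l in reversed(body) if l.startswith("c=IN IP4 ")),
--                   fallback_ip)
--     rtp_port = 0
--     for l in reversed(body):
--         if l.startswith("m=audio "):
--             parts = l.split()
--             if len(parts) >= 2:
--                 try:
--                     rtp_port = int(parts[1])
--                     break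
--                 except ValueError:
--                     pass
--     return rtp_ip, rtp_port
-- ===== Notes on version B (the rewrite author's own statement) =====
-- stated objective: simpler
-- what changed: B replaces A's single stateful pass with an in_sdp flag by a decomposition: locate the first blank line with index() (no blank line -> (fallback_ip, 0)), slice off the body, then scan the body in reverse taking the first c=IN IP4 match for the IP and the first m=audio line with a parsable port (breaking there), instead of tracking last-match state forward.
import Mathlib
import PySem

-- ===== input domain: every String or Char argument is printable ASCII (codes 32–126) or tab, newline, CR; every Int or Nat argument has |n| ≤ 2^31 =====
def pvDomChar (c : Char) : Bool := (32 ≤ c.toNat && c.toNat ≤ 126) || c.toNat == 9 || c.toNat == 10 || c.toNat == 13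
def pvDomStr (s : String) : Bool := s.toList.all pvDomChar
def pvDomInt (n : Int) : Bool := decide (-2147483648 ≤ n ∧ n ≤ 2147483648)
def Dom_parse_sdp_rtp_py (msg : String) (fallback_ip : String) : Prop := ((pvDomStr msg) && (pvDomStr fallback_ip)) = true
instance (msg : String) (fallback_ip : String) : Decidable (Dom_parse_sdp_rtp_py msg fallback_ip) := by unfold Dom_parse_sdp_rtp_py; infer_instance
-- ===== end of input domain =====

-- B parses the SDP by decomposition (find the first blank line, slice off the body, reverse scans with
-- early break for the last c=/m=audio match) instead of A's forward pass with an in_sdp flag; same values.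


-- ===== PORT A =====
-- line.split("c=IN IP4 ")[1].strip(); the [1] is only reached when line startswith "c=IN IP4 ",
-- so the split has ≥ 2 pieces and Python never raises; the .getD "" is unreachable.
def pvExtractIpA (line : String) : String :=
  PySem.Str.strip ((PySem.List.pyGet? ((PySem.Str.split? line "c=IN IP4 ").getD []) 1).getD "")

-- one iteration of A's loop body on state (in_sdp, rtp_ip, rtp_port)
def pvStepA (st : Bool × String × Int) (line : String) : Bool × String × Int :=
  let in_sdp := if line == "" then true else st.1
  if in_sdp then
    if PySem.Str.startswith line "c=IN IP4 " then
      (in_sdp, pvExtractIpA line, st.2.2)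
    else if PySem.Str.startswith line "m=audio " then
      let parts := PySem.Str.split₀ line
      if parts.length ≥ 2 then
        match PySem.Int.ofStr? ((PySem.List.pyGet? parts 1).getD "") with
        | some n => (in_sdp, st.2.1, n)
        | none => (in_sdp, st.2.1, st.2.2)
      else (in_sdp, st.2.1, st.2.2)
    else (in_sdp, st.2.1, st.2.2)
  else (in_sdp, st.2.1, st.2.2)

def parse_sdp_rtp_py (msg : String) (fallback_ip : String) : String × Int :=
  -- "\r\n" ≠ "", so split? always returns some; the .getD [] is unreachable
  let lines := (PySem.Str.split? msg "\r\n").getD []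
  let st := lines.foldl pvStepA (false, fallback_ip, 0)
  (st.2.1, st.2.2)

-- ===== PORT B =====
def pvExtractIpB (line : String) : String :=
  PySem.Str.strip ((PySem.List.pyGet? ((PySem.Str.split? line "c=IN IP4 ").getD []) 1).getD "")

-- next((l.split(...)[1].strip() for l in reversed(body) if l.startswith("c=IN IP4 ")), fallback_ip)
def pvIpB (revBody : List String) (fallback_ip : String) : String :=
  match revBody.find? (fun l => PySem.Str.startswith l "c=IN IP4 ") with
  | some l => pvExtractIpB l
  | none => fallback_ip

-- the reversed for-loop with break: first m=audio line (from the end) whose 2nd token parses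
def pvPortB : List String → Int
  | [] => 0
  | l :: rest =>
    if PySem.Str.startswith l "m=audio " then
      let parts := PySem.Str.split₀ l
      if parts.length ≥ 2 then
        match PySem.Int.ofStr? ((PySem.List.pyGet? parts 1).getD "") with
        | some n => n
        | none => pvPortB rest
      else pvPortB rest
    else pvPortB rest

def parse_sdp_rtp_py_alt (msg : String) (fallback_ip : String) : String × Int :=
  let lines := (PySem.Str.split? msg "\r\n").getD []
  match PySem.List.index? lines "" with
  | none => (fallback_ip, 0)
  | some i =>
    let body := PySem.List.slice lines (some (i : Int)) none
    (pvIpB body.reverse fallback_ip, pvPortB body.reverse)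

-- ===== PRECONDITION & SPEC =====
def Spec_parse_sdp_rtp_py (msg : String) (fallback_ip : String) (out : String × Int) : Prop := out = parse_sdp_rtp_py_alt msg fallback_ip
instance (msg : String) (fallback_ip : String) (out : String × Int) : Decidable (Spec_parse_sdp_rtp_py msg fallback_ip out) := by unfold Spec_parse_sdp_rtp_py; infer_instance

-- ===== CLAIM (what is proved, stated in full; the proofs are below) =====
def Claim_equal_parse_sdp_rtp_py : Prop := ∀ (msg : String) (fallback_ip : String), Dom_parse_sdp_rtp_py msg fallback_ip → Spec_parse_sdp_rtp_py msg fallback_ip (parse_sdp_rtp_py msg fallback_ip)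

-- ===== LEMMAS AND PROOFS =====

-- the IP component of one step, in isolation
def pvStepIp (line : String) (ip : String) : String :=
  if PySem.Str.startswith line "c=IN IP4 " then pvExtractIpA line else ip

-- the port component of one step, in isolation
def pvStepPort (line : String) (p : Int) : Int :=
  if PySem.Str.startswith line "m=audio " then
    if (PySem.Str.split₀ line).length ≥ 2 then
      match PySem.Int.ofStr? ((PySem.List.pyGet? (PySem.Str.split₀ line) 1).getD "") with
      | some n => n
      | none => p
    else p
  else p

-- pvPortB with an explicit base value
def pvPortAux : List String → Int → Int
  | [], p0 => p0
  | l :: rest, p0 =>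
    if PySem.Str.startswith l "m=audio " then
      if (PySem.Str.split₀ l).length ≥ 2 then
        match PySem.Int.ofStr? ((PySem.List.pyGet? (PySem.Str.split₀ l) 1).getD "") with
        | some n => n
        | none => pvPortAux rest p0
      else pvPortAux rest p0
    else pvPortAux rest p0

theorem pv_not_both (l : String) (hc : PySem.Str.startswith l "c=IN IP4 " = true)
    (hm : PySem.Str.startswith l "m=audio " = true) : False := by
  rw [PySem.Str.startswith_eq, PySem.Chars.startswith_iff] at hc hm
  obtain ⟨u, hu⟩ := hc
  obtain ⟨v, hv⟩ := hm
  rw [← hv] at hu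
  simp at hu

theorem pvStepA_true (ip : String) (p : Int) (l : String) :
    pvStepA (true, ip, p) l = (true, pvStepIp l ip, pvStepPort l p) := by
  unfold pvStepA pvStepIp pvStepPort
  simp only [ite_self]
  rw [if_pos trivial]
  by_cases hc : PySem.Str.startswith l "c=IN IP4 " = true
  · by_cases hm : PySem.Str.startswith l "m=audio " = true
    · exact (pv_not_both l hc hm).elim
    · rw [if_pos hc, if_pos hc, if_neg hm]
  · rw [if_neg hc, if_neg hc]
    by_cases hm : PySem.Str.startswith l "m=audio " = true
    · rw [if_pos hm, if_pos hm]
      by_cases hlen : (PySem.Str.split₀ l).length ≥ 2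
      · rw [if_pos hlen, if_pos hlen]
        cases PySem.Int.ofStr? ((PySem.List.pyGet? (PySem.Str.split₀ l) 1).getD "") with
        | some n => rfl
        | none => rfl
      · rw [if_neg hlen, if_neg hlen]
    · rw [if_neg hm, if_neg hm]

theorem pv_fold_true (body : List String) : ∀ (ip : String) (p : Int),
    body.foldl pvStepA (true, ip, p)
      = (true, body.foldl (fun ip l => pvStepIp l ip) ip, body.foldl (fun p l => pvStepPort l p) p) := by
  induction body with
  | nil => intro ip p; rfl
  | cons l rest ih =>
    intro ip p
    simp only [List.foldl_cons, pvStepA_true]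
    exact ih _ _

theorem pv_fold_false (pre : List String) (hpre : "" ∉ pre) (ip : String) (p : Int) :
    pre.foldl pvStepA (false, ip, p) = (false, ip, p) := by
  induction pre with
  | nil => rfl
  | cons l rest ih =>
    simp only [List.mem_cons, not_or] at hpre
    have hl : (l == "") = false := by
      simpa [beq_iff_eq] using hpre.1
    simp only [List.foldl_cons]
    have hstep : pvStepA (false, ip, p) l = (false, ip, p) := by
      unfold pvStepA; simp [hl]
    rw [hstep]
    exact ih hpre.2

theorem pv_ip_fold_eq (body : List String) : ∀ (ip0 : String),
    body.foldl (fun ip l => pvStepIp l ip) ip0 = pvIpB body.reverse ip0 := by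
  induction body with
  | nil => intro ip0; rfl
  | cons l rest ih =>
    intro ip0
    simp only [List.foldl_cons, List.reverse_cons]
    rw [ih (pvStepIp l ip0)]
    unfold pvIpB
    rw [List.find?_append]
    cases h : rest.reverse.find? (fun l => PySem.Str.startswith l "c=IN IP4 ") with
    | some x => rfl
    | none =>
      simp only [Option.none_or, List.find?]
      unfold pvStepIp
      cases hc : PySem.Str.startswith l "c=IN IP4 " with
      | true => rfl
      | false => rfl

theorem pv_portAux_append (l : List String) (x : String) : ∀ (p0 : Int),
    pvPortAux (l ++ [x]) p0 = pvPortAux l (pvStepPort x p0) := by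
  induction l with
  | nil =>
    intro p0
    simp only [List.nil_append, pvPortAux, pvStepPort]
  | cons y rest ih =>
    intro p0
    simp only [List.cons_append, pvPortAux]
    by_cases hm : PySem.Str.startswith y "m=audio " = true
    · rw [if_pos hm, if_pos hm]
      by_cases hlen : (PySem.Str.split₀ y).length ≥ 2
      · rw [if_pos hlen, if_pos hlen]
        cases PySem.Int.ofStr? ((PySem.List.pyGet? (PySem.Str.split₀ y) 1).getD "") with
        | some n => rfl
        | none => exact ih p0
      · rw [if_neg hlen, if_neg hlen]; exact ih p0
    · rw [if_neg hm, if_neg hm]; exact ih p0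

theorem pv_port_fold_eq (body : List String) : ∀ (p0 : Int),
    body.foldl (fun p l => pvStepPort l p) p0 = pvPortAux body.reverse p0 := by
  induction body with
  | nil => intro p0; rfl
  | cons l rest ih =>
    intro p0
    simp only [List.foldl_cons, List.reverse_cons]
    rw [ih (pvStepPort l p0), pv_portAux_append]

theorem pv_portB_eq_aux (l : List String) : pvPortB l = pvPortAux l 0 := by
  induction l with
  | nil => rfl
  | cons x rest ih =>
    simp only [pvPortB, pvPortAux]
    by_cases hm : PySem.Str.startswith x "m=audio " = true
    · rw [if_pos hm, if_pos hm]
      by_cases hlen : (PySem.Str.split₀ x).length ≥ 2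
      · rw [if_pos hlen, if_pos hlen]
        cases PySem.Int.ofStr? ((PySem.List.pyGet? (PySem.Str.split₀ x) 1).getD "") with
        | some n => rfl
        | none => exact ih
      · rw [if_neg hlen, if_neg hlen]; exact ih
    · rw [if_neg hm, if_neg hm]; exact ih

-- ===== VERDICT (by name: the statement is the Claim_ definition above) =====
theorem parse_sdp_rtp_py_spec : Claim_equal_parse_sdp_rtp_py := by
  intro msg fallback_ip _
  unfold Spec_parse_sdp_rtp_py parse_sdp_rtp_py parse_sdp_rtp_py_alt
  set lines := (PySem.Str.split? msg "\r\n").getD [] with hlines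
  clear_value lines
  cases hidx : PySem.List.index? lines "" with
  | none =>
    have hnot : "" ∉ lines := by
      have h : List.idxOf? "" lines = none := hidx
      exact List.idxOf?_eq_none_iff.mp h
    simp only [hidx]
    rw [pv_fold_false lines hnot]
  | some i =>
    obtain ⟨pre, suf, hsplit, hlen, hnot⟩ := (PySem.List.index?_eq_some_iff lines "" i).mp hidx
    have hslice : PySem.List.slice lines (some (i : Int)) none = "" :: suf := by
      rw [PySem.List.slice_from lines (Int.natCast_nonneg i), Int.toNat_natCast, hsplit, ← hlen,
          List.drop_left]
    have hfold : lines.foldl pvStepA (false, fallback_ip, 0)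
        = (true, ("" :: suf).foldl (fun ip l => pvStepIp l ip) fallback_ip,
                 ("" :: suf).foldl (fun p l => pvStepPort l p) 0) := by
      rw [hsplit, List.foldl_append, pv_fold_false pre hnot, List.foldl_cons]
      have hstep : pvStepA (false, fallback_ip, 0) "" = (true, fallback_ip, 0) := rfl
      rw [hstep, pv_fold_true]
      have h1 : pvStepIp "" fallback_ip = fallback_ip := rfl
      have h2 : pvStepPort "" (0 : Int) = (0 : Int) := rfl
      rw [List.foldl_cons, List.foldl_cons, h1, h2]
    simp only [hidx]
    rw [hslice, hfold, pv_ip_fold_eq, pv_port_fold_eq, pv_portB_eq_aux]
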